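-- pv_equiv track=rewrite | github.com/Lecrut/Diffusion-code-generation | data/code/38_7_3.py | find_repeated_letters
-- ===== SOURCE A (Python) =====
-- def find_repeated_letters(text):
--     lower_text = text.lower()
--     letter_counts = {}
--     for char in lower_text:
--         if 'a' <= char <= 'z':
--             letter_counts[char] = letter_counts.get(char, 0) + 1
--     repeated_letters = set()
--     for letter, count in letter_counts.items():
--         if count >= 2:
--             repeated_letters.add(letter)
--     return sorted(list(repeated_letters))
-- ===== SOURCE B (Python) =====
-- def find_repeated_letters(text):
--     seen = set()
--     repeated = set()
--     for char in text.lower():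
--         if 'a' <= char <= 'z':
--             if char in seen:
--                 repeated.add(char)
--             else:
--                 seen.add(char)
--     return sorted(repeated)
-- ===== Notes on version B (the rewrite author's own statement) =====
-- stated objective: simpler
-- what changed: Replaces the count dictionary plus a second filtering loop with a single pass maintaining two membership sets (seen/repeated); no counts and no >=2 comparison remain.
import Mathlib
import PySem

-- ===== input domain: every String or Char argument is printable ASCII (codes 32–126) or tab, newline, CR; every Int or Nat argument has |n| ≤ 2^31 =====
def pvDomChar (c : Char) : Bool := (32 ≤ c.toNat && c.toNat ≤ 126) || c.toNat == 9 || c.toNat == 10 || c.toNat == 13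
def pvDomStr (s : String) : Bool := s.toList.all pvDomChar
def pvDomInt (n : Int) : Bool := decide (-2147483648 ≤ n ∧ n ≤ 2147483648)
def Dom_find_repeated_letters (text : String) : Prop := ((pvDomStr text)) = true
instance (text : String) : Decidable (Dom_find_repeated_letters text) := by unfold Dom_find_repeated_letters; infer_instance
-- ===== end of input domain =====

-- B replaces A's count dictionary and second filtering loop with one pass over the text
-- maintaining two membership sets (objective: simpler). Python's length-1 letter strings
-- are modelled as Char and converted to String only in the final sorted output
-- (sorting the chars = sorting their single-character strings).

-- ===== PORT A =====
def find_repeated_letters (text : String) : List String :=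
  let lowerText := PySem.Str.lower text
  let letterCounts := lowerText.toList.foldl
    (fun (d : PySem.Dict Char Int) c =>
      if 'a' ≤ c ∧ c ≤ 'z' then d.insert c (d.getD c 0 + 1) else d)
    PySem.Dict.empty
  let repeatedLetters := letterCounts.items.foldl
    (fun (s : PySem.Set Char) p => if 2 ≤ p.2 then s.add p.1 else s)
    PySem.Set.empty
  (PySem.List.sorted repeatedLetters (fun c => c)).map (fun c => String.ofList [c])

-- ===== PORT B =====
def find_repeated_letters_alt (text : String) : List String :=
  let st := (PySem.Str.lower text).toList.foldl
    (fun (sr : PySem.Set Char × PySem.Set Char) c =>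
      if 'a' ≤ c ∧ c ≤ 'z' then
        if sr.1.contains c then (sr.1, sr.2.add c) else (sr.1.add c, sr.2)
      else sr)
    (PySem.Set.empty, PySem.Set.empty)
  (PySem.List.sorted st.2 (fun c => c)).map (fun c => String.ofList [c])

-- ===== PRECONDITION & SPEC =====
def Spec_find_repeated_letters (text : String) (out : List String) : Prop := out = find_repeated_letters_alt text
instance (text : String) (out : List String) : Decidable (Spec_find_repeated_letters text out) := by unfold Spec_find_repeated_letters; infer_instance

-- ===== CLAIM (what is proved, stated in full; the proofs are below) =====
def Claim_equal_find_repeated_letters : Prop := ∀ (text : String), Dom_find_repeated_letters text → Spec_find_repeated_letters text (find_repeated_letters text)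

-- ===== LEMMAS AND PROOFS =====

-- A's second loop: membership in the accumulated set.
theorem mem_foldl_addIf (L : List (Char × Int)) (s : PySem.Set Char) (x : Char) :
    x ∈ L.foldl (fun (s : PySem.Set Char) p => if 2 ≤ p.2 then s.add p.1 else s) s ↔
      x ∈ s ∨ ∃ p ∈ L, p.1 = x ∧ 2 ≤ p.2 := by
  induction L generalizing s with
  | nil => simp
  | cons p L ih =>
    simp only [List.foldl_cons]
    split_ifs with h
    · rw [ih]
      constructor
      · rintro (hx | ⟨q, hq, rfl, h2⟩)
        · rcases (PySem.Set.mem_add s p.1 x).mp hx with hs | rfl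
          · exact .inl hs
          · exact .inr ⟨p, List.mem_cons_self, rfl, h⟩
        · exact .inr ⟨q, List.mem_cons_of_mem _ hq, rfl, h2⟩
      · rintro (hs | ⟨q, hq, rfl, h2⟩)
        · exact .inl ((PySem.Set.mem_add _ _ _).mpr (.inl hs))
        · rcases List.mem_cons.mp hq with rfl | hq
          · exact .inl ((PySem.Set.mem_add _ _ _).mpr (.inr rfl))
          · exact .inr ⟨q, hq, rfl, h2⟩
    · rw [ih]
      constructor
      · rintro (hs | ⟨q, hq, rfl, h2⟩)
        · exact .inl hs
        · exact .inr ⟨q, List.mem_cons_of_mem _ hq, rfl, h2⟩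
      · rintro (hs | ⟨q, hq, rfl, h2⟩)
        · exact .inl hs
        · rcases List.mem_cons.mp hq with rfl | hq
          · exact absurd h2 h
          · exact .inr ⟨q, hq, rfl, h2⟩

-- A's repeated set holds exactly the letters occurring at least twice.
theorem memA (letters : List Char) (x : Char) :
    x ∈ (PySem.Dict.counter letters).items.foldl
        (fun (s : PySem.Set Char) p => if 2 ≤ p.2 then s.add p.1 else s) PySem.Set.empty ↔
      2 ≤ letters.count x := by
  rw [mem_foldl_addIf, PySem.Dict.items_counter]
  constructor
  · rintro (h | ⟨p, hp, rfl, h2⟩)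
    · simp [PySem.Set.empty] at h
    · obtain ⟨k, hk, hkp⟩ := List.mem_map.mp hp
      subst hkp
      have h2' : (2:Int) ≤ (letters.count k : Int) := h2
      show (2:Nat) ≤ letters.count k
      exact_mod_cast h2'
  · intro h
    refine .inr ⟨(x, (letters.count x : Int)), List.mem_map.mpr ⟨x, ?_, rfl⟩, rfl, by
      show (2:Int) ≤ (letters.count x : Int); exact_mod_cast h⟩
    rw [PySem.Set.mem_ofList]
    exact List.count_pos_iff.mp (by omega)

-- Nodup invariant for A's second loop.
theorem nodup_foldl_addIf (L : List (Char × Int)) (s : PySem.Set Char) (hs : s.Nodup) :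
    (L.foldl (fun (s : PySem.Set Char) p => if 2 ≤ p.2 then s.add p.1 else s) s).Nodup := by
  induction L generalizing s with
  | nil => exact hs
  | cons p L ih =>
    simp only [List.foldl_cons]
    split_ifs with h
    · exact ih _ (PySem.Set.nodup_add s p.1 hs)
    · exact ih _ hs

-- B's single pass: with seen = letters of the processed prefix and repeated = letters
-- occurring at least twice in it, the final repeated set holds exactly the letters
-- occurring at least twice overall.
theorem memB (l : List Char) (seen rep : PySem.Set Char) (pre : List Char)
    (hseen : ∀ x, x ∈ seen ↔ x ∈ pre) (hrep : ∀ x, x ∈ rep ↔ 2 ≤ pre.count x) (x : Char) :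
    x ∈ (l.foldl
        (fun (sr : PySem.Set Char × PySem.Set Char) c =>
          if sr.1.contains c then (sr.1, sr.2.add c) else (sr.1.add c, sr.2))
        (seen, rep)).2 ↔ 2 ≤ (pre ++ l).count x := by
  induction l generalizing seen rep pre with
  | nil => simpa using hrep x
  | cons c l ih =>
    simp only [List.foldl_cons]
    have hccount : (List.count x (pre ++ c :: l)) = List.count x ((pre ++ [c]) ++ l) := by
      simp
    rw [hccount]
    by_cases hc : seen.contains c = true
    · have hcp : c ∈ pre := (hseen c).mp (by simpa [PySem.Set.contains] using hc)
      simp only [hc, if_true]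
      refine ih seen (rep.add c) (pre ++ [c]) ?_ ?_
      · intro y
        rw [hseen y, List.mem_append, List.mem_singleton]
        constructor
        · exact .inl
        · rintro (h | rfl)
          · exact h
          · exact hcp
      · intro y
        rw [PySem.Set.mem_add, hrep y]
        by_cases hyc2 : y = c
        · subst hyc2
          have h1 : 1 ≤ List.count y pre := List.count_pos_iff.mpr hcp
          have h2 : List.count y (pre ++ [y]) = List.count y pre + 1 := by simp
          rw [h2]
          constructor
          · intro _; omega
          · intro _; exact .inr rfl
        · have h2 : List.count y (pre ++ [c]) = List.count y pre := by
            rw [List.count_append]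
            have h0 : List.count y [c] = 0 := List.count_eq_zero.mpr (by simp [hyc2])
            omega
          rw [h2]
          simp [hyc2]
    · have hcp : c ∉ pre := fun h => hc (by simpa [PySem.Set.contains] using (hseen c).mpr h)
      simp only [hc]
      refine ih (seen.add c) rep (pre ++ [c]) ?_ ?_
      · intro y
        rw [PySem.Set.mem_add, hseen y, List.mem_append, List.mem_singleton]
      · intro y
        rw [hrep y]
        by_cases hyc2 : y = c
        · subst hyc2
          have h0 : List.count y pre = 0 := List.count_eq_zero.mpr hcp
          have h2 : List.count y (pre ++ [y]) = 1 := by simp [h0]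
          rw [h0, h2]
          decide
        · have h2 : List.count y (pre ++ [c]) = List.count y pre := by
            rw [List.count_append]
            have h0 : List.count y [c] = 0 := List.count_eq_zero.mpr (by simp [hyc2])
            omega
          rw [h2]

-- Nodup invariant for B's repeated set.
theorem nodupB (l : List Char) (seen rep : PySem.Set Char) (hrep : rep.Nodup) :
    (l.foldl
        (fun (sr : PySem.Set Char × PySem.Set Char) c =>
          if sr.1.contains c then (sr.1, sr.2.add c) else (sr.1.add c, sr.2))
        (seen, rep)).2.Nodup := by
  induction l generalizing seen rep with
  | nil => exact hrep
  | cons c l ih =>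
    simp only [List.foldl_cons]
    by_cases hc : seen.contains c = true
    · simp only [hc, if_true]; exact ih _ _ (PySem.Set.nodup_add rep c hrep)
    · simp only [hc]; exact ih _ _ hrep

-- A's counting fold over the letters is collections.Counter of the letters.
theorem countsA (l : List Char) :
    l.foldl (fun (d : PySem.Dict Char Int) c => d.insert c (d.getD c 0 + 1)) PySem.Dict.empty
      = PySem.Dict.counter l := by
  rw [PySem.Dict.counter_eq_foldl]
  rfl

-- The two programs agree on an arbitrary list of characters (the lowered text).
theorem core (l : List Char) :
    (PySem.List.sorted
        ((l.foldl
            (fun (d : PySem.Dict Char Int) c =>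
              if 'a' ≤ c ∧ c ≤ 'z' then d.insert c (d.getD c 0 + 1) else d)
            PySem.Dict.empty).items.foldl
          (fun (s : PySem.Set Char) p => if 2 ≤ p.2 then s.add p.1 else s)
          PySem.Set.empty)
        (fun c => c)).map (fun c => String.ofList [c])
      = (PySem.List.sorted
          (l.foldl
            (fun (sr : PySem.Set Char × PySem.Set Char) c =>
              if 'a' ≤ c ∧ c ≤ 'z' then
                if sr.1.contains c then (sr.1, sr.2.add c) else (sr.1.add c, sr.2)
              else sr)
            (PySem.Set.empty, PySem.Set.empty)).2
          (fun c => c)).map (fun c => String.ofList [c]) := by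
  have hfilt : ∀ {β : Type} (f : β → Char → β) (init : β),
      l.foldl (fun b c => if 'a' ≤ c ∧ c ≤ 'z' then f b c else b) init
        = (l.filter (fun c => decide ('a' ≤ c ∧ c ≤ 'z'))).foldl f init := by
    intro β f init
    rw [List.foldl_filter]
    congr 1
    funext b c
    by_cases h : 'a' ≤ c ∧ c ≤ 'z' <;> simp [h]
  rw [hfilt, hfilt, countsA]
  congr 1
  apply PySem.List.sorted_eq_sorted_of_perm _ _ _ (fun a b h => h)
  have hne : (PySem.Set.empty : PySem.Set Char).Nodup := List.nodup_nil
  rw [List.perm_ext_iff_of_nodup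
    (nodup_foldl_addIf _ PySem.Set.empty hne)
    (nodupB _ PySem.Set.empty PySem.Set.empty hne)]
  intro x
  rw [memA _ x,
    memB _ PySem.Set.empty PySem.Set.empty []
      (fun y => by simp [PySem.Set.empty]) (fun y => by simp [PySem.Set.empty]) x]
  simp

-- ===== VERDICT (by name: the statement is the Claim_ definition above) =====
theorem find_repeated_letters_spec : Claim_equal_find_repeated_letters := by
  intro text _
  exact core (PySem.Str.lower text).toList
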